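-- pv_equiv track=rewrite | github.com/Igor-Roberto-Alves/Igor-Roberto-Alves | lista7/ex2.py | merge_atualxpriority
-- ===== SOURCE A (Python) =====
-- import copy
--
-- def merge_atualxpriority(atual, priority):
--     if priority:
--         lista = copy.deepcopy(priority)
--         for cell in lista:
--             j = cell[1]
--             for cell2 in atual:
--                 if cell2[1] == j and cell2[2] < cell[2]:
--                     cell[0], cell[2] = cell2[0], cell2[2]
--
--         return lista
--     else:
--         return atual
-- ===== SOURCE B (Python) =====
-- import copy
--
-- def merge_atualxpriority(atual, priority):
--     if priority:
--         best = {}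
--         for e in atual:
--             k = e[1]
--             if k not in best or e[2] < best[k][1]:
--                 best[k] = (e[0], e[2])
--         lista = copy.deepcopy(priority)
--         for cell in lista:
--             b = best.get(cell[1])
--             if b is not None and b[1] < cell[2]:
--                 cell[0], cell[2] = b
--         return lista
--     else:
--         return atual
-- ===== Notes on version B (the rewrite author's own statement) =====
-- stated objective: faster
-- what changed: Replaces the nested scan of atual per priority cell by a single pass building a dict of the first-occurrence minimal (id, value) pair per key, then one lookup per priority cell.
-- outside the precondition, e.g. on merge_atualxpriority([[1, 6], [8, 6]], [[-1, -1], [9, -1]]): A returns [[-1, -1], [9, -1]], B raises IndexError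
import Mathlib
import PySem

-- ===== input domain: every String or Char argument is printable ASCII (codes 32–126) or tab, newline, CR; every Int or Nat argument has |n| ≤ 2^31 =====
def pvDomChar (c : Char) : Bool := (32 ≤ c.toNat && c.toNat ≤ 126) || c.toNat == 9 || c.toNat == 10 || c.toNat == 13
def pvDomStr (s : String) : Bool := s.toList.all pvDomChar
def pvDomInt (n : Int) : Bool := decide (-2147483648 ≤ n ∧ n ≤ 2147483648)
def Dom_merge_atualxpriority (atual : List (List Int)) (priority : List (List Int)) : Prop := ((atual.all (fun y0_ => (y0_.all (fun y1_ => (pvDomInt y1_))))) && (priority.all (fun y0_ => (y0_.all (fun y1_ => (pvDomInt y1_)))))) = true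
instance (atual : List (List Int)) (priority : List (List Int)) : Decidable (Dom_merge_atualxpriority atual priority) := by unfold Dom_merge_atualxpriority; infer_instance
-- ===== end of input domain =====

-- B replaces A's inner scan of `atual` per priority cell by one dict pass over `atual`
-- (first-occurrence minimal (id, value) pair per key) plus one lookup per cell: faster.
-- Return-value equivalence only: A returns a deepcopy (no argument is mutated), as does B.

-- ===== PORT A =====
-- literal transliteration: for each cell of the copied priority, scan atual and
-- repeatedly overwrite cell[0], cell[2] by any matching strictly smaller entry
def merge_atualxpriority (atual : List (List Int)) (priority : List (List Int)) : List (List Int) :=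
  if priority ≠ [] then
    priority.map (fun cell =>
      let j := PySem.List.pyGetD cell 1 0
      atual.foldl (fun cell cell2 =>
        if PySem.List.pyGetD cell2 1 0 = j ∧ PySem.List.pyGetD cell2 2 0 < PySem.List.pyGetD cell 2 0 then
          (cell.set 0 (PySem.List.pyGetD cell2 0 0)).set 2 (PySem.List.pyGetD cell2 2 0)
        else cell) cell)
  else atual

-- ===== PORT B =====
-- the body of Source B's first loop: keep the (e[0], e[2]) pair with minimal e[2] per key e[1],
-- first occurrence winning ties (strict <)
def pvBestStep (d : PySem.Dict Int (Int × Int)) (e : List Int) : PySem.Dict Int (Int × Int) :=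
  let k := PySem.List.pyGetD e 1 0
  match d.get? k with
  | none => d.insert k (PySem.List.pyGetD e 0 0, PySem.List.pyGetD e 2 0)
  | some p =>
    if PySem.List.pyGetD e 2 0 < p.2 then
      d.insert k (PySem.List.pyGetD e 0 0, PySem.List.pyGetD e 2 0)
    else d

def merge_atualxpriority_alt (atual : List (List Int)) (priority : List (List Int)) : List (List Int) :=
  if priority ≠ [] then
    let best := atual.foldl pvBestStep PySem.Dict.empty
    priority.map (fun cell =>
      match best.get? (PySem.List.pyGetD cell 1 0) with
      | some b => if b.2 < PySem.List.pyGetD cell 2 0 then (cell.set 0 b.1).set 2 b.2 else cell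
      | none => cell)
  else atual

-- ===== PRECONDITION & SPEC =====
-- Pre_ excludes the inputs where Python A raises IndexError, and also the short-cell
-- inputs on which A returns only because `and` short-circuits past a missing index
-- (no key ever matches); B reads every e[2] unconditionally and raises IndexError there.
def Pre_merge_atualxpriority (atual : List (List Int)) (priority : List (List Int)) : Prop :=
  priority ≠ [] → ((∀ c ∈ atual, 3 ≤ c.length) ∧ (∀ c ∈ priority, 3 ≤ c.length))
instance (atual : List (List Int)) (priority : List (List Int)) : Decidable (Pre_merge_atualxpriority atual priority) := by unfold Pre_merge_atualxpriority; infer_instance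
def pvWitness_merge_atualxpriority : List (List Int) × List (List Int) := ([[1, 2, 3]], [[4, 2, 9]])

def Spec_merge_atualxpriority (atual : List (List Int)) (priority : List (List Int)) (out : List (List Int)) : Prop := out = merge_atualxpriority_alt atual priority
instance (atual : List (List Int)) (priority : List (List Int)) (out : List (List Int)) : Decidable (Spec_merge_atualxpriority atual priority out) := by unfold Spec_merge_atualxpriority; infer_instance

-- ===== CLAIM (what is proved, stated in full; the proofs are below) =====
def Claim_equal_merge_atualxpriority : Prop := ∀ (atual : List (List Int)) (priority : List (List Int)), Dom_merge_atualxpriority atual priority → Pre_merge_atualxpriority atual priority → Spec_merge_atualxpriority atual priority (merge_atualxpriority atual priority)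

-- ===== LEMMAS AND PROOFS =====

-- running minimum over atual starting from pair p, for key k (A's inner-loop state)
def pvRunMin (k : Int) (p : Int × Int) : List (List Int) → Int × Int
  | [] => p
  | e :: rest =>
    pvRunMin k
      (if PySem.List.pyGetD e 1 0 = k ∧ PySem.List.pyGetD e 2 0 < p.2 then
        (PySem.List.pyGetD e 0 0, PySem.List.pyGetD e 2 0)
      else p) rest

-- first-occurrence minimal matching pair for key k (what B's dict stores)
def pvFirstMin (k : Int) : List (List Int) → Option (Int × Int)
  | [] => none
  | e :: rest =>
    if PySem.List.pyGetD e 1 0 = k then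
      some (pvRunMin k (PySem.List.pyGetD e 0 0, PySem.List.pyGetD e 2 0) rest)
    else pvFirstMin k rest

lemma pvBest_get? (atual : List (List Int)) (d : PySem.Dict Int (Int × Int)) (k : Int) :
    (atual.foldl pvBestStep d).get? k =
      match d.get? k with
      | some p => some (pvRunMin k p atual)
      | none => pvFirstMin k atual := by
  induction atual generalizing d with
  | nil => cases h : d.get? k <;> simp [h, pvRunMin, pvFirstMin]
  | cons e rest ih =>
    simp only [List.foldl_cons]
    rw [ih]
    by_cases hk : PySem.List.pyGetD e 1 0 = k
    · subst hk
      cases hd : d.get? (PySem.List.pyGetD e 1 0) with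
      | none =>
        simp [pvBestStep, hd, PySem.Dict.get?_insert_self, pvFirstMin]
      | some p =>
        simp only [pvBestStep, hd]
        by_cases hlt : PySem.List.pyGetD e 2 0 < p.2
        · simp [hlt, PySem.Dict.get?_insert_self, pvRunMin]
        · simp [hlt, hd, pvRunMin]
    · have hne : k ≠ PySem.List.pyGetD e 1 0 := fun h => hk h.symm
      have hstep : (pvBestStep d e).get? k = d.get? k := by
        simp only [pvBestStep]
        cases hd : d.get? (PySem.List.pyGetD e 1 0) with
        | none => simp [PySem.Dict.get?_insert, hne]
        | some p =>
          by_cases hlt : PySem.List.pyGetD e 2 0 < p.2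
          · simp [hlt, PySem.Dict.get?_insert, hne]
          · simp [hlt]
      rw [hstep]
      cases h : d.get? k <;> simp [pvRunMin, pvFirstMin, hk]

lemma pvRunMin_eq_firstMin (k : Int) (xs : List (List Int)) : ∀ (p : Int × Int),
    pvRunMin k p xs =
      match pvFirstMin k xs with
      | none => p
      | some q => if q.2 < p.2 then q else p := by
  induction xs with
  | nil => intro p; simp [pvRunMin, pvFirstMin]
  | cons e rest ih =>
    intro p
    simp only [pvRunMin, pvFirstMin]
    by_cases hk : PySem.List.pyGetD e 1 0 = k
    · simp only [hk, true_and, if_true, ih]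
      cases hf : pvFirstMin k rest with
      | none =>
        by_cases hlt : PySem.List.pyGetD e 2 0 < p.2 <;> simp [hlt]
      | some q =>
        by_cases hlt : PySem.List.pyGetD e 2 0 < p.2 <;>
          by_cases h2 : q.2 < PySem.List.pyGetD e 2 0 <;>
          simp only [hlt, h2, if_true, if_false] <;>
          split_ifs <;>
          first | rfl | omega
    · rw [if_neg (fun hc => hk hc.1), if_neg hk]
      exact ih p

-- pyGetD at the numeral index 2 on a cell of length ≥ 3 with positions 0, 2 overwritten
lemma pvGet2 (l : List Int) (h : 3 ≤ l.length) (a v : Int) :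
    PySem.List.pyGetD ((l.set 0 a).set 2 v) 2 0 = v := by
  have h2 : 2 < l.length := by omega
  simp [PySem.List.pyGetD_ofNat', List.getD, h2]

-- A's inner fold, started from cell with positions 0 and 2 overwritten by (a, v),
-- lands on cell with positions 0 and 2 overwritten by the running minimum
lemma pvInner_eq (j : Int) (atual : List (List Int)) (cell : List Int)
    (h : 3 ≤ cell.length) : ∀ (a v : Int),
    atual.foldl (fun c c2 =>
        if PySem.List.pyGetD c2 1 0 = j ∧ PySem.List.pyGetD c2 2 0 < PySem.List.pyGetD c 2 0 then
          (c.set 0 (PySem.List.pyGetD c2 0 0)).set 2 (PySem.List.pyGetD c2 2 0)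
        else c) ((cell.set 0 a).set 2 v)
    = ((cell.set 0 (pvRunMin j (a, v) atual).1).set 2 (pvRunMin j (a, v) atual).2) := by
  induction atual with
  | nil => intro a v; simp [pvRunMin]
  | cons e rest ih =>
    intro a v
    simp only [List.foldl_cons, pvRunMin, pvGet2 cell h a v]
    by_cases hc : PySem.List.pyGetD e 1 0 = j ∧ PySem.List.pyGetD e 2 0 < v
    · rw [if_pos hc, if_pos hc]
      have hrw : ((((cell.set 0 a).set 2 v).set 0 (PySem.List.pyGetD e 0 0)).set 2 (PySem.List.pyGetD e 2 0))
          = ((cell.set 0 (PySem.List.pyGetD e 0 0)).set 2 (PySem.List.pyGetD e 2 0)) := by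
        rw [List.set_comm (i := 0) (j := 2) a v (by decide), List.set_set,
          List.set_comm (i := 2) (j := 0) v (PySem.List.pyGetD e 0 0) (by decide), List.set_set]
      rw [hrw]
      exact ih _ _
    · rw [if_neg hc, if_neg hc]
      exact ih a v

lemma pvSet_self (cell : List Int) (h : 3 ≤ cell.length) :
    (cell.set 0 (PySem.List.pyGetD cell 0 0)).set 2 (PySem.List.pyGetD cell 2 0) = cell := by
  have h0 : 0 < cell.length := by omega
  have h2 : 2 < cell.length := by omega
  have e0 : PySem.List.pyGetD cell 0 0 = cell[0] := by
    simp [PySem.List.pyGetD_ofNat', List.getD, h0]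
  have e2 : PySem.List.pyGetD cell 2 0 = cell[2] := by
    simp [PySem.List.pyGetD_ofNat', List.getD, h2]
  rw [e0, e2, List.set_getElem_self, List.set_getElem_self]

-- per-cell equality of the two ports' transforms
lemma pvCell_eq (atual : List (List Int)) (cell : List Int) (h : 3 ≤ cell.length) :
    (atual.foldl (fun c c2 =>
        if PySem.List.pyGetD c2 1 0 = PySem.List.pyGetD cell 1 0 ∧ PySem.List.pyGetD c2 2 0 < PySem.List.pyGetD c 2 0 then
          (c.set 0 (PySem.List.pyGetD c2 0 0)).set 2 (PySem.List.pyGetD c2 2 0)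
        else c) cell)
    = match (atual.foldl pvBestStep PySem.Dict.empty).get? (PySem.List.pyGetD cell 1 0) with
      | some b => if b.2 < PySem.List.pyGetD cell 2 0 then (cell.set 0 b.1).set 2 b.2 else cell
      | none => cell := by
  have hbest : (atual.foldl pvBestStep PySem.Dict.empty).get? (PySem.List.pyGetD cell 1 0)
      = pvFirstMin (PySem.List.pyGetD cell 1 0) atual := by
    rw [pvBest_get?, PySem.Dict.get?_empty]
  have hstart : (atual.foldl (fun c c2 =>
        if PySem.List.pyGetD c2 1 0 = PySem.List.pyGetD cell 1 0 ∧ PySem.List.pyGetD c2 2 0 < PySem.List.pyGetD c 2 0 then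
          (c.set 0 (PySem.List.pyGetD c2 0 0)).set 2 (PySem.List.pyGetD c2 2 0)
        else c) cell)
      = (atual.foldl (fun c c2 =>
        if PySem.List.pyGetD c2 1 0 = PySem.List.pyGetD cell 1 0 ∧ PySem.List.pyGetD c2 2 0 < PySem.List.pyGetD c 2 0 then
          (c.set 0 (PySem.List.pyGetD c2 0 0)).set 2 (PySem.List.pyGetD c2 2 0)
        else c) ((cell.set 0 (PySem.List.pyGetD cell 0 0)).set 2 (PySem.List.pyGetD cell 2 0))) := by
    rw [pvSet_self cell h]
  rw [hstart, pvInner_eq (PySem.List.pyGetD cell 1 0) atual cell h, hbest,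
    pvRunMin_eq_firstMin (PySem.List.pyGetD cell 1 0) atual]
  cases hf : pvFirstMin (PySem.List.pyGetD cell 1 0) atual with
  | none => simp [pvSet_self cell h]
  | some q =>
    by_cases hlt : q.2 < PySem.List.pyGetD cell 2 0
    · simp [hlt]
    · simp [hlt, pvSet_self cell h]

-- ===== VERDICT (by name: the statement is the Claim_ definition above) =====
theorem merge_atualxpriority_spec : Claim_equal_merge_atualxpriority := by
  intro atual priority _ hpre
  unfold Spec_merge_atualxpriority merge_atualxpriority merge_atualxpriority_alt
  by_cases hp : priority ≠ []
  · rw [if_pos hp, if_pos hp]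
    obtain ⟨_, hprio⟩ := hpre hp
    exact List.map_congr_left (fun cell hm => pvCell_eq atual cell (hprio cell hm))
  · rw [if_neg hp, if_neg hp]
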